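-- pv_equiv track=rewrite | github.com/liamccmail/pythoncode | University Python Files/320A3/problem3.py | getLargestContiguousV1
-- ===== SOURCE A (Python) =====
-- def getLargestContiguousV1(interval):
--     contiguousIntervals = []
--     nextCheck = interval[0]
--     contiguousIntervals += [interval[0]]
--     for i in range(1, len(interval)):
--         if contiguousIntervals[-1][1] < interval[i][0] :
--             contiguousIntervals += [interval[i]]
--         elif contiguousIntervals[-1][1] < interval[i][1]:
--             contiguousIntervals[-1] = [contiguousIntervals[-1][0], interval[i][1]]
--     setOfIntervals = []
--     for i in contiguousIntervals:
--         setOfIntervals += [i[1] - i[0]]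
--     maxContiguous = max(setOfIntervals)
--     return maxContiguous
-- ===== SOURCE B (Python) =====
-- def getLargestContiguousV1(interval):
--     curStart, curEnd = interval[0][0], interval[0][1]
--     best = curEnd - curStart
--     for iv in interval[1:]:
--         s, e = iv[0], iv[1]
--         if curEnd < s:
--             curStart, curEnd = s, e
--         else:
--             curEnd = max(curEnd, e)
--         best = max(best, curEnd - curStart)
--     return best
-- ===== Notes on version B (the rewrite author's own statement) =====
-- stated objective: simpler
-- what changed: B is a single pass keeping scalar current-segment bounds and a running maximum (merging via max), instead of building the merged-interval list and then a second pass computing all lengths and max().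
import Mathlib
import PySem

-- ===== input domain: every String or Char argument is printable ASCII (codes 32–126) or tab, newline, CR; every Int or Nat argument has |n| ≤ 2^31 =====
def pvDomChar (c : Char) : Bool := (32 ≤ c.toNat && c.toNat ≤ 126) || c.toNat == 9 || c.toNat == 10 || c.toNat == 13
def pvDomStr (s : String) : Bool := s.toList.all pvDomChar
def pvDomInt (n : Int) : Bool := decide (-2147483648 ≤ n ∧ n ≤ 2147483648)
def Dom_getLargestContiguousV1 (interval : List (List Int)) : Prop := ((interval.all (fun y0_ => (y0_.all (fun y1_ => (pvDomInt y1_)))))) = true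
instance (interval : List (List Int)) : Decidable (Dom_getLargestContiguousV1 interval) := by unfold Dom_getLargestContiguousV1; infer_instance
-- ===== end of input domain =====

-- B replaces A's merged-interval list plus second length pass by one pass over scalar
-- current-segment bounds with a running maximum (objective: simpler, O(1) extra space).


-- ===== PORT A =====
-- loop body of A, as a function of the current list and the row interval[i]
def pvStepA (cs : List (List Int)) (row : List Int) : List (List Int) :=
  if PySem.List.pyGetD (PySem.List.pyGetD cs (-1) []) 1 0 < PySem.List.pyGetD row 0 0 then
    cs ++ [row]
  else if PySem.List.pyGetD (PySem.List.pyGetD cs (-1) []) 1 0 < PySem.List.pyGetD row 1 0 then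
    cs.dropLast ++ [[PySem.List.pyGetD (PySem.List.pyGetD cs (-1) []) 0 0,
                     PySem.List.pyGetD row 1 0]]
  else cs

def getLargestContiguousV1 (interval : List (List Int)) : Int :=
  let _nextCheck := PySem.List.pyGetD interval 0 []
  let contiguousIntervals : List (List Int) := [] ++ [PySem.List.pyGetD interval 0 []]
  let contiguousIntervals :=
    (PySem.List.pyRange 1 (interval.length : Int) 1).foldl
      (fun cs i => pvStepA cs (PySem.List.pyGetD interval i [])) contiguousIntervals
  let setOfIntervals :=
    contiguousIntervals.foldl
      (fun acc r => acc ++ [PySem.List.pyGetD r 1 0 - PySem.List.pyGetD r 0 0]) []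
  (PySem.List.max? setOfIntervals (fun y => y)).getD 0

-- ===== PORT B =====
-- loop body of B: state (curStart, curEnd, best), one row
def pvStepB (st : Int × Int × Int) (iv : List Int) : Int × Int × Int :=
  let s := PySem.List.pyGetD iv 0 0
  let e := PySem.List.pyGetD iv 1 0
  let p := if st.2.1 < s then (s, e) else (st.1, max st.2.1 e)
  (p.1, p.2, max st.2.2 (p.2 - p.1))

def getLargestContiguousV1_alt (interval : List (List Int)) : Int :=
  let r0 := PySem.List.pyGetD interval 0 []
  let curStart := PySem.List.pyGetD r0 0 0
  let curEnd := PySem.List.pyGetD r0 1 0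
  ((PySem.List.slice interval (some 1) none).foldl pvStepB
      (curStart, curEnd, curEnd - curStart)).2.2

-- ===== PRECONDITION & SPEC =====
-- Pre_ excludes exactly the inputs where the Pythons raise IndexError: the empty list
-- (interval[0]) and rows with fewer than two entries (row[1]).
def Pre_getLargestContiguousV1 (interval : List (List Int)) : Prop :=
  interval ≠ [] ∧ ∀ row ∈ interval, 2 ≤ row.length
instance (interval : List (List Int)) : Decidable (Pre_getLargestContiguousV1 interval) := by
  unfold Pre_getLargestContiguousV1; infer_instance
def pvWitness_getLargestContiguousV1 : List (List Int) := [[0, 2], [3, 7]]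

def Spec_getLargestContiguousV1 (interval : List (List Int)) (out : Int) : Prop := out = getLargestContiguousV1_alt interval
instance (interval : List (List Int)) (out : Int) : Decidable (Spec_getLargestContiguousV1 interval out) := by unfold Spec_getLargestContiguousV1; infer_instance

-- ===== CLAIM (what is proved, stated in full; the proofs are below) =====
def Claim_equal_getLargestContiguousV1 : Prop := ∀ (interval : List (List Int)), Dom_getLargestContiguousV1 interval → Pre_getLargestContiguousV1 interval → Spec_getLargestContiguousV1 interval (getLargestContiguousV1 interval)

-- ===== LEMMAS AND PROOFS =====

-- length of a stored segment, as A computes it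
def pvLenOf (r : List Int) : Int := PySem.List.pyGetD r 1 0 - PySem.List.pyGetD r 0 0

-- max of all stored-segment lengths (the value A's final two passes compute)
def pvMaxLens (cs : List (List Int)) : Int :=
  match cs.map pvLenOf with
  | [] => 0
  | x :: t => t.foldl max x

theorem pvMaxLens_concat (xs : List (List Int)) (hxs : xs ≠ []) (r : List Int) :
    pvMaxLens (xs ++ [r]) = max (pvMaxLens xs) (pvLenOf r) := by
  cases xs with
  | nil => exact absurd rfl hxs
  | cons a t => simp [pvMaxLens, List.foldl_append]

theorem pvLenOf_le_maxLens_concat (xs : List (List Int)) (r : List Int) :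
    pvLenOf r ≤ pvMaxLens (xs ++ [r]) := by
  cases xs with
  | nil => simp [pvMaxLens]
  | cons a t =>
    rw [pvMaxLens_concat _ (by simp) r]
    exact le_max_right _ _

-- the main invariant: A's fold state stays of the form init ++ [lst], with B's scalars
-- tracking lst's endpoints and best = max of all stored lengths
theorem pvKey (l : List (List Int)) :
    ∀ (init : List (List Int)) (lst : List Int) (b : Int),
      b = pvMaxLens (init ++ [lst]) →
      pvMaxLens (List.foldl pvStepA (init ++ [lst]) l)
        = (List.foldl pvStepB
            (PySem.List.pyGetD lst 0 0, PySem.List.pyGetD lst 1 0, b) l).2.2 := by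
  induction l with
  | nil => intro init lst b hb; simpa using hb.symm
  | cons iv t ih =>
    intro init lst b hb
    simp only [List.foldl_cons]
    by_cases h1 : PySem.List.pyGetD lst 1 0 < PySem.List.pyGetD iv 0 0
    · -- new segment
      have hA : pvStepA (init ++ [lst]) iv = (init ++ [lst]) ++ [iv] := by
        simp [pvStepA, PySem.List.pyGetD_neg_one_append_singleton, h1]
      have hB : pvStepB (PySem.List.pyGetD lst 0 0, PySem.List.pyGetD lst 1 0, b) iv
          = (PySem.List.pyGetD iv 0 0, PySem.List.pyGetD iv 1 0,
             max b (PySem.List.pyGetD iv 1 0 - PySem.List.pyGetD iv 0 0)) := by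
        simp [pvStepB, h1]
      rw [hA, hB]
      exact ih (init ++ [lst]) iv _
        (by rw [pvMaxLens_concat _ (by simp) iv, hb]; rfl)
    · by_cases h2 : PySem.List.pyGetD lst 1 0 < PySem.List.pyGetD iv 1 0
      · -- extend last segment
        have hA : pvStepA (init ++ [lst]) iv
            = init ++ [[PySem.List.pyGetD lst 0 0, PySem.List.pyGetD iv 1 0]] := by
          simp [pvStepA, PySem.List.pyGetD_neg_one_append_singleton, h1, h2]
        have hB : pvStepB (PySem.List.pyGetD lst 0 0, PySem.List.pyGetD lst 1 0, b) iv
            = (PySem.List.pyGetD lst 0 0, PySem.List.pyGetD iv 1 0,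
               max b (PySem.List.pyGetD iv 1 0 - PySem.List.pyGetD lst 0 0)) := by
          simp [pvStepB, h1, max_eq_right (le_of_lt h2)]
        rw [hA, hB]
        have hproj0 : PySem.List.pyGetD
            [PySem.List.pyGetD lst 0 0, PySem.List.pyGetD iv 1 0] 0 0
            = PySem.List.pyGetD lst 0 0 := by
          simp [PySem.List.pyGetD_zero_cons]
        have hproj1 : PySem.List.pyGetD
            [PySem.List.pyGetD lst 0 0, PySem.List.pyGetD iv 1 0] 1 0
            = PySem.List.pyGetD iv 1 0 := by
          simp [PySem.List.pyGetD]
        have hbnew : max b (PySem.List.pyGetD iv 1 0 - PySem.List.pyGetD lst 0 0)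
            = pvMaxLens (init ++ [[PySem.List.pyGetD lst 0 0, PySem.List.pyGetD iv 1 0]]) := by
          cases init with
          | nil =>
            simp only [List.nil_append] at hb ⊢
            simp only [pvMaxLens, List.map, List.foldl] at hb ⊢
            simp only [pvLenOf, hproj0, hproj1] at *
            omega
          | cons a t0 =>
            rw [pvMaxLens_concat _ (by simp)] at hb
            rw [pvMaxLens_concat _ (by simp)]
            simp only [pvLenOf, hproj0, hproj1] at *
            omega
        have := ih init [PySem.List.pyGetD lst 0 0, PySem.List.pyGetD iv 1 0] _ hbnew
        rw [hproj0, hproj1] at this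
        exact this
      · -- no-op
        have hA : pvStepA (init ++ [lst]) iv = init ++ [lst] := by
          simp [pvStepA, PySem.List.pyGetD_neg_one_append_singleton, h1, h2]
        have hle : PySem.List.pyGetD lst 1 0 - PySem.List.pyGetD lst 0 0 ≤ b := by
          rw [hb]; exact pvLenOf_le_maxLens_concat init lst
        have hB : pvStepB (PySem.List.pyGetD lst 0 0, PySem.List.pyGetD lst 1 0, b) iv
            = (PySem.List.pyGetD lst 0 0, PySem.List.pyGetD lst 1 0, b) := by
          simp only [pvStepB, if_neg h1]
          have hmax : max (PySem.List.pyGetD lst 1 0) (PySem.List.pyGetD iv 1 0)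
              = PySem.List.pyGetD lst 1 0 := max_eq_left (by omega)
          simp [hmax]
          omega
        rw [hA, hB]
        exact ih init lst b hb

-- A's second pass builds exactly the list of lengths
theorem pvSetOf_eq_map (cs : List (List Int)) (acc : List Int) :
    cs.foldl (fun acc r => acc ++ [PySem.List.pyGetD r 1 0 - PySem.List.pyGetD r 0 0]) acc
      = acc ++ cs.map pvLenOf := by
  induction cs generalizing acc with
  | nil => simp
  | cons a t ih => simp [ih, pvLenOf]

-- python max() of a nonempty list of lengths is pvMaxLens
theorem pvMax_eq_maxLens (cs : List (List Int)) (h : cs ≠ []) :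
    (PySem.List.max? (cs.map pvLenOf) (fun y => y)).getD 0 = pvMaxLens cs := by
  cases cs with
  | nil => exact absurd rfl h
  | cons a t => simp [PySem.List.max?_id_cons, pvMaxLens]

-- A's fold state stays nonempty
theorem pvStepA_ne_nil (cs : List (List Int)) (row : List Int) (h : cs ≠ []) :
    pvStepA cs row ≠ [] := by
  unfold pvStepA; split_ifs <;> simp [h]

theorem pvFoldA_ne_nil (l : List (List Int)) :
    ∀ cs : List (List Int), cs ≠ [] → List.foldl pvStepA cs l ≠ [] := by
  induction l with
  | nil => intro cs h; simpa using h
  | cons iv t ih => intro cs h; exact ih _ (pvStepA_ne_nil cs iv h)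

-- ===== VERDICT (by name: the statement is the Claim_ definition above) =====
theorem getLargestContiguousV1_spec : Claim_equal_getLargestContiguousV1 := by
  intro interval _hdom _hpre
  unfold Spec_getLargestContiguousV1 getLargestContiguousV1 getLargestContiguousV1_alt
  simp only [List.nil_append]
  rw [PySem.List.slice_from_one]
  rw [show ((interval.length : Int)) = PySem.List.len interval from rfl]
  rw [PySem.List.foldl_pyRange_pyGetD (xs := interval)
        (f := pvStepA) (d := ([] : List Int)) (init := [PySem.List.pyGetD interval 0 []])
        (a := 1) (by norm_num)]
  rw [pvSetOf_eq_map, List.nil_append]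
  have h1 : ((1 : Int)).toNat = 1 := rfl
  rw [h1, List.drop_one]
  have hne : List.foldl pvStepA [PySem.List.pyGetD interval 0 []] interval.tail ≠ [] :=
    pvFoldA_ne_nil _ _ (by simp)
  rw [pvMax_eq_maxLens _ hne]
  have hkey := pvKey interval.tail [] (PySem.List.pyGetD interval 0 [])
      (PySem.List.pyGetD (PySem.List.pyGetD interval 0 []) 1 0
        - PySem.List.pyGetD (PySem.List.pyGetD interval 0 []) 0 0)
      (by simp [pvMaxLens, pvLenOf])
  simp only [List.nil_append] at hkey
  exact hkey
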